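-- pv_equiv track=rewrite | github.com/openmpy/ps | Python3/프로그래머스/1/133502. 햄버거 만들기/햄버거 만들기.py | solution
-- ===== SOURCE A (Python) =====
-- def solution(ingredient):
--     answer = 0
--     burger = []
--
--     for i in ingredient:
--         burger.append(i)
--
--         if len(burger) >= 4:
--             a = burger.pop()
--             b = burger.pop()
--             c = burger.pop()
--             d = burger.pop()
--
--             if a == 1 and b == 3 and c == 2 and d == 1:
--                 answer += 1
--             else:
--                 burger.append(d)
--                 burger.append(c)
--                 burger.append(b)
--                 burger.append(a)
--
--     return answer
-- ===== SOURCE B (Python) =====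
-- def solution(ingredient):
--     answer = 0
--     work = list(ingredient)
--     while True:
--         for i in range(len(work) - 3):
--             if work[i:i + 4] == [1, 2, 3, 1]:
--                 del work[i:i + 4]
--                 answer += 1
--                 break
--         else:
--             return answer
-- ===== Notes on version B (the rewrite author's own statement) =====
-- stated objective: alternative
-- what changed: Replaces A's single-pass push/pop stack with repeated full scans of a shrinking working list: find the first window equal to [1,2,3,1], delete it, count, and restart until no window matches.
import Mathlib
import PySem

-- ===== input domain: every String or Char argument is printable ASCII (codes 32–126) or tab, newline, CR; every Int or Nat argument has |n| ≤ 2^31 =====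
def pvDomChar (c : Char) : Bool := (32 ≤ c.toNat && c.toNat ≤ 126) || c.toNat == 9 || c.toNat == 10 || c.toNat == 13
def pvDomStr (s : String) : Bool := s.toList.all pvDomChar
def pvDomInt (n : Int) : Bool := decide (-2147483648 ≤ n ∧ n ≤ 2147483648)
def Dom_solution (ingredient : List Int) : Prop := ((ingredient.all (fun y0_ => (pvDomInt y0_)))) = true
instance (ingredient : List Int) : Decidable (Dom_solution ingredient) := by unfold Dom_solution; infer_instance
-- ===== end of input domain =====

-- B replaces A's single-pass push/pop stack with repeated scan-delete-restart over a
-- working list (alternative decomposition, not faster); equal return value proved for all inputs.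


-- ===== PORT A =====
-- one loop step of A: append i, and if len ≥ 4 pop the top four, test them, push back on mismatch
def solStepA (st : Int × List Int) (i : Int) : Int × List Int :=
  let answer := st.1
  let burger := st.2 ++ [i]
  if burger.length ≥ 4 then
    match PySem.List.pop? burger with
    | some (a, burger) =>
      match PySem.List.pop? burger with
      | some (b, burger) =>
        match PySem.List.pop? burger with
        | some (c, burger) =>
          match PySem.List.pop? burger with
          | some (d, burger) =>
            if a = 1 ∧ b = 3 ∧ c = 2 ∧ d = 1 then (answer + 1, burger)
            else (answer, ((burger ++ [d]) ++ [c]) ++ [b] ++ [a])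
          | none => (answer, burger)
        | none => (answer, burger)
      | none => (answer, burger)
    | none => (answer, burger)
  else (answer, burger)

def solution (ingredient : List Int) : Int :=
  (ingredient.foldl solStepA (0, [])).1

-- ===== PORT B =====
-- B's inner for-loop: scan left to right for the first window equal to [1,2,3,1];
-- some = the working list with that window deleted, none = no window found (loop falls through).
def removeFirst : List Int → Option (List Int)
  | x :: y :: z :: w :: rest =>
      if x = 1 ∧ y = 2 ∧ z = 3 ∧ w = 1 then some rest
      else (removeFirst (y :: z :: w :: rest)).map (x :: ·)
  | _ => none

-- termination measure for B's while-loop: each deletion shortens the working list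
theorem removeFirst_length : ∀ xs ys, removeFirst xs = some ys → ys.length < xs.length := by
  intro xs
  induction xs with
  | nil => intro ys h; simp [removeFirst] at h
  | cons x t ih =>
    intro ys h
    match t with
    | [] => simp [removeFirst] at h
    | [y] => simp [removeFirst] at h
    | [y, z] => simp [removeFirst] at h
    | y :: z :: w :: rest =>
      rw [removeFirst] at h
      split at h
      · cases h; simp; omega
      · rcases Option.map_eq_some_iff.mp h with ⟨ys', h1, h2⟩
        subst h2; have := ih ys' h1; simpa using this

-- B's outer while-loop: repeatedly delete the first window, counting deletions
def altGo (xs : List Int) (answer : Int) : Int :=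
  match h : removeFirst xs with
  | some ys => altGo ys (answer + 1)
  | none => answer
termination_by xs.length
decreasing_by exact removeFirst_length _ _ h

def solution_alt (ingredient : List Int) : Int :=
  altGo ingredient 0

-- ===== PRECONDITION & SPEC =====
def Spec_solution (ingredient : List Int) (out : Int) : Prop := out = solution_alt ingredient
instance (ingredient : List Int) (out : Int) : Decidable (Spec_solution ingredient out) := by unfold Spec_solution; infer_instance

-- ===== CLAIM (what is proved, stated in full; the proofs are below) =====
def Claim_equal_solution : Prop := ∀ (ingredient : List Int), Dom_solution ingredient → Spec_solution ingredient (solution ingredient)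

-- ===== LEMMAS AND PROOFS =====

-- unfolding equations for altGo (its match is dependent, so rw needs these)
theorem altGo_none (xs : List Int) (c : Int) (h : removeFirst xs = none) : altGo xs c = c := by
  rw [altGo]
  split
  · rename_i ys hy; rw [h] at hy; cases hy
  · rfl

theorem altGo_some (xs ys : List Int) (c : Int) (h : removeFirst xs = some ys) :
    altGo xs c = altGo ys (c + 1) := by
  rw [altGo]
  split
  · rename_i ys' hy; rw [h] at hy; injection hy with hy; rw [hy]
  · rename_i hy; rw [h] at hy; cases hy

-- proof-side model of A: the stack stored reversed (top first)
def stepM (st : Int × List Int) (x : Int) : Int × List Int :=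
  if x = 1 ∧ st.2.take 3 = [3, 2, 1] then (st.1 + 1, st.2.drop 3)
  else (st.1, x :: st.2)

def runM (st : Int × List Int) (xs : List Int) : Int × List Int :=
  xs.foldl stepM st

-- A's step equals the model step through reversal of the stack
theorem stepA_eq_stepM (ans : Int) (stk : List Int) (x : Int) :
    solStepA (ans, stk.reverse) x = ((stepM (ans, stk) x).1, (stepM (ans, stk) x).2.reverse) := by
  match stk with
  | [] => simp [solStepA, stepM]
  | [b] => simp [solStepA, stepM]
  | [b, c] => simp [solStepA, stepM]
  | b :: c :: d :: rest =>
    by_cases h : x = 1 ∧ b = 3 ∧ c = 2 ∧ d = 1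
    · simp [solStepA, stepM, -List.append_assoc, PySem.List.pop?_last, h]
    · simp [solStepA, stepM, -List.append_assoc, PySem.List.pop?_last, h]

theorem foldA_eq_runM (xs : List Int) : ∀ (ans : Int) (stk : List Int),
    xs.foldl solStepA (ans, stk.reverse) = ((runM (ans, stk) xs).1, (runM (ans, stk) xs).2.reverse) := by
  induction xs with
  | nil => intro ans stk; simp [runM]
  | cons x xs ih =>
    intro ans stk
    rw [List.foldl_cons, stepA_eq_stepM]
    rw [ih (stepM (ans, stk) x).1 (stepM (ans, stk) x).2]
    simp [runM]

theorem removeFirst_tail (x : Int) (xs : List Int) :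
    removeFirst (x :: xs) = none → removeFirst xs = none := by
  intro h
  match xs with
  | [] => simp [removeFirst]
  | [y] => simp [removeFirst]
  | [y, z] => simp [removeFirst]
  | y :: z :: w :: rest =>
    rw [removeFirst] at h
    split at h
    · exact absurd h (by simp)
    · simpa using h

theorem removeFirst_suffix : ∀ (u v : List Int), removeFirst (u ++ v) = none → removeFirst v = none := by
  intro u
  induction u with
  | nil => intro v h; simpa using h
  | cons a u ih =>
    intro v h
    exact ih v (removeFirst_tail a (u ++ v) h)

theorem removeFirst_prefix : ∀ (u v : List Int), removeFirst (u ++ v) = none → removeFirst u = none := by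
  intro u
  induction u with
  | nil => intro v h; simp [removeFirst]
  | cons x t ih =>
    intro v h
    match t with
    | [] => simp [removeFirst]
    | [y] => simp [removeFirst]
    | [y, z] => simp [removeFirst]
    | y :: z :: w :: rest =>
      rw [List.cons_append, List.cons_append, List.cons_append, List.cons_append, removeFirst] at h
      rw [removeFirst]
      split at h
      · exact absurd h (by simp)
      · rename_i hcond
        rw [if_neg hcond]
        have := ih v (by simpa using h)
        rw [this]; rfl

-- a window-free list with a window-free new head stays window-free
theorem removeFirst_cons_none (x : Int) (L : List Int) (hL : removeFirst L = none)
    (hw : ¬ (x :: L).take 4 = [1, 2, 3, 1]) : removeFirst (x :: L) = none := by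
  match L with
  | [] => simp [removeFirst]
  | [y] => simp [removeFirst]
  | [y, z] => simp [removeFirst]
  | y :: z :: w :: rest =>
    rw [removeFirst]
    have hcond : ¬ (x = 1 ∧ y = 2 ∧ z = 3 ∧ w = 1) := by
      intro hc; exact hw (by simp [List.take, hc.1, hc.2.1, hc.2.2.1, hc.2.2.2])
    rw [if_neg hcond, hL]; rfl

-- a no-window run of the model just accumulates onto the stack
theorem runM_noOcc : ∀ (xs : List Int) (c : Int) (stk : List Int),
    removeFirst (stk.reverse ++ xs) = none → runM (c, stk) xs = (c, xs.reverse ++ stk) := by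
  intro xs
  induction xs with
  | nil => intro c stk h; simp [runM]
  | cons x xs ih =>
    intro c stk h
    have hnm : ¬ (x = 1 ∧ stk.take 3 = [3, 2, 1]) := by
      rintro ⟨hx, ht⟩
      have hstk : stk = 3 :: 2 :: 1 :: stk.drop 3 := by
        conv_lhs => rw [← List.take_append_drop 3 stk]
        rw [ht]; rfl
      have hnone : removeFirst ((1 : Int) :: 2 :: 3 :: 1 :: xs) = none := by
        apply removeFirst_suffix ((stk.drop 3).reverse)
        have he : stk.reverse ++ x :: xs = (stk.drop 3).reverse ++ (1 :: 2 :: 3 :: 1 :: xs) := by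
          conv_lhs => rw [hstk]
          simp [hx]
        rw [← he]; exact h
      simp [removeFirst] at hnone
    have hstep : stepM (c, stk) x = (c, x :: stk) := by simp [stepM, hnm]
    rw [runM, List.foldl_cons, ← runM, hstep]
    rw [ih c (x :: stk) (by simpa using h)]
    simp

-- the count component of the model run is an offset
theorem runM_add : ∀ (xs : List Int) (c : Int) (stk : List Int),
    runM (c, stk) xs = (c + (runM (0, stk) xs).1, (runM (0, stk) xs).2) := by
  intro xs
  induction xs with
  | nil => intro c stk; simp [runM]
  | cons x xs ih =>
    intro c stk
    have hs : ∀ c' : Int, stepM (c', stk) x = (c' + (stepM (0, stk) x).1, (stepM (0, stk) x).2) := by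
      intro c'; by_cases h : x = 1 ∧ stk.take 3 = [3, 2, 1] <;> simp [stepM, h]
    simp only [runM, List.foldl_cons]
    rw [hs c, hs 0]
    simp only [zero_add]
    have h1 := ih (c + (stepM (0, stk) x).1) (stepM (0, stk) x).2
    have h2 := ih ((stepM (0, stk) x).1) (stepM (0, stk) x).2
    simp only [runM] at h1 h2
    rw [h1, h2]
    simp [add_assoc]

-- decomposition of a successful removeFirst: the part left of the first window is window-free
theorem removeFirst_some : ∀ (xs ys : List Int), removeFirst xs = some ys →
    ∃ p r, xs = p ++ 1 :: 2 :: 3 :: 1 :: r ∧ ys = p ++ r ∧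
      removeFirst (p ++ [1, 2, 3]) = none := by
  intro xs
  induction xs with
  | nil => intro ys h; simp [removeFirst] at h
  | cons x t ih =>
    intro ys h
    match t with
    | [] => simp [removeFirst] at h
    | [y] => simp [removeFirst] at h
    | [y, z] => simp [removeFirst] at h
    | y :: z :: w :: rest =>
      rw [removeFirst] at h
      split at h
      · rename_i hcond
        injection h with h'
        subst h'
        exact ⟨[], rest, by simp [hcond.1, hcond.2.1, hcond.2.2.1, hcond.2.2.2],
          by simp, by simp [removeFirst]⟩
      · rename_i hcond
        rcases Option.map_eq_some_iff.mp h with ⟨ys', h1, h2⟩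
        rcases ih ys' h1 with ⟨p, r, hx, hy, hno⟩
        refine ⟨x :: p, r, by simp [hx], by simp [h2.symm, hy], ?_⟩
        apply removeFirst_cons_none _ _ hno
        intro hw
        have hfull : ((x :: (p ++ [1, 2, 3])) ++ (1 :: r)).take 4 = [1, 2, 3, 1] := by
          rw [List.take_append]
          have hz : ((1 : Int) :: r).take (4 - (x :: (p ++ [1, 2, 3])).length) = [] := by
            simp
          rw [hz, hw, List.append_nil]
        have hxt : (x :: (p ++ [1, 2, 3])) ++ (1 :: r) = x :: y :: z :: w :: rest := by
          simp [hx]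
        rw [hxt] at hfull
        simp [List.take] at hfull
        exact hcond ⟨hfull.1, hfull.2.1, hfull.2.2.1, hfull.2.2.2⟩

theorem altGo_add : ∀ (xs : List Int) (c : Int), altGo xs c = c + altGo xs 0 := by
  intro xs
  induction hn : xs.length using Nat.strong_induction_on generalizing xs with
  | _ n ih =>
    intro c
    rcases h : removeFirst xs with - | ys
    · rw [altGo_none xs c h, altGo_none xs 0 h]; ring
    · have hlt := removeFirst_length xs ys h
      rw [altGo_some xs ys c h, altGo_some xs ys 0 h]
      rw [ih ys.length (hn ▸ hlt) ys rfl (c + 1), ih ys.length (hn ▸ hlt) ys rfl (0 + 1)]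
      ring

theorem runM_eq_altGo : ∀ (xs : List Int), (runM (0, []) xs).1 = altGo xs 0 := by
  intro xs
  induction hn : xs.length using Nat.strong_induction_on generalizing xs with
  | _ n ih =>
    rcases h : removeFirst xs with - | ys
    · rw [altGo_none xs 0 h, runM_noOcc xs 0 [] (by simpa using h)]
    · rw [altGo_some xs ys 0 h]
      rcases removeFirst_some xs ys h with ⟨p, r, hx, hy, hno⟩
      have hp : removeFirst p = none := removeFirst_prefix p [1, 2, 3] hno
      have key : runM (0, []) xs = runM (1, p.reverse) r := by
        rw [hx, show p ++ 1 :: 2 :: 3 :: 1 :: r = (p ++ [1, 2, 3]) ++ (1 :: r) by simp]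
        rw [runM, List.foldl_append, ← runM, ← runM]
        rw [runM_noOcc (p ++ [1, 2, 3]) 0 [] (by simpa using hno)]
        rw [runM, List.foldl_cons, ← runM]
        have hm : stepM (0, (p ++ [1, 2, 3]).reverse ++ []) 1 = (1, p.reverse) := by
          simp [stepM]
        rw [hm]
      have key2 : runM (0, []) (p ++ r) = runM (0, p.reverse) r := by
        rw [runM, List.foldl_append, ← runM, ← runM, runM_noOcc p 0 [] (by simpa using hp)]
        simp
      have hlt : (p ++ r).length < n := by
        rw [← hn, hx]; simp; omega
      calc (runM (0, []) xs).1 = (runM (1, p.reverse) r).1 := by rw [key]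
        _ = 1 + (runM (0, p.reverse) r).1 := by rw [runM_add r 1 p.reverse]
        _ = 1 + (runM (0, []) (p ++ r)).1 := by rw [key2]
        _ = 1 + altGo (p ++ r) 0 := by rw [ih (p ++ r).length hlt (p ++ r) rfl]
        _ = altGo (p ++ r) (0 + 1) := by rw [altGo_add (p ++ r) (0 + 1)]; ring
        _ = altGo ys (0 + 1) := by rw [hy]

-- ===== VERDICT (by name: the statement is the Claim_ definition above) =====
theorem solution_spec : Claim_equal_solution := by
  intro ingredient _
  show solution ingredient = solution_alt ingredient
  unfold solution solution_alt
  rw [show ((0 : Int), ([] : List Int)) = ((0 : Int), ([] : List Int).reverse) by rfl]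
  rw [foldA_eq_runM]
  exact runM_eq_altGo ingredient
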